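-- pv_equiv track=rewrite | github.com/qiboteam/qibolab | src/qibolab/_core/instruments/qblox/config/port.py | deduplicate_configs
-- ===== SOURCE A (Python) =====
-- from itertools import groupby
-- from typing import Any, Literal, Optional
--
-- StrDict = dict[str, Any]
--
-- def groupitems(items: list[tuple[str, Any]]) -> dict[str, list[Any]]:
--     """Group a list of pairs according to their first elements.
--
--     The result is dictionary, mapping each unique first element to the set of associated
--     second elements (i.e. that appear together within a pair).
--     """
--
--     def first(item: tuple[Any, Any]) -> Any:
--         return item[0]
--
--     return {
--         # since groupby will return the result of the `key` function in association to
--         # the iterable elemnts, let's slice the iterable to retain just the second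
--         # elements - since our `key` is actually the first one
--         name: [value for _, value in grouped]
--         # groupby only groups adjacent items, so let's sort them first
--         for name, grouped in groupby(sorted(items, key=first), key=first)
--     }
--
-- def deduplicate_configs(configs: list[tuple[str, StrDict]]) -> dict[str, StrDict]:
--     """Deduplicate port configurations.
--
--     Configurations could be repeated after initial generation, for two different
--     reasons:
--
--         - because they appear multiple times in the original platform's parameters, e.g.
--           since different LO objects are associated to channels connected to the same
--           port
--         - or because they can be reached through different paths, as in the case in
--           which the LO object is a single one, but referenced by all associated channels
--
--     then we need to ensure compatibility.
--
--     This function is checking that all configurations targeted to the same object have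
--     compatible values, and raises otherwise.
--     Compatible here means equal (by comparison) among values which are set. For a value
--     which may appear multiple times is allowed to be unset some of them, in which case
--     is implicitly set by the other occurences (as opposed to be compatible with its
--     reset value).
--     """
--
--     def dedup(cfgs: list[StrDict], path: str) -> StrDict:
--         """Deduplicate multiple configurations for the same path."""
--         # concatenate all the configs items in a single list
--         # - this could contain repeated keys
--         items = [(k, v) for cfg in cfgs for k, v in cfg.items()]
--         # ... and group it together according to their key
--         grouped = groupitems(items)
--
--         port = {}
--         # check for values compatibility
--         for k, vals in grouped.items():
--             val = vals[0]
--             if any(v != val for v in vals[1:]):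
--                 raise ValueError(
--                     f"Multiple inconsistent occurences of '{k}' for '{path}'\n"
--                     f"Values:\n  {vals}"
--                 )
--             # append to port configurations
--             port[k] = val
--         return port
--
--     # configurations are grouped by port path (e.g. `out2` or `out0_in0`) and then the
--     # values associated to this port are deduplicated
--     return {path: dedup(config, path) for path, config in groupitems(configs).items()}
-- ===== SOURCE B (Python) =====
-- def deduplicate_configs(configs):
--     # One pass: hash-group configs by path and merge keys first-wins, checking
--     # consistency on the fly; only the distinct paths/keys are sorted for the output.
--     merged = {}
--     for path, cfg in configs:
--         port = merged.setdefault(path, {})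
--         for k, v in cfg.items():
--             if k not in port:
--                 port[k] = v
--             elif port[k] != v:
--                 raise ValueError(
--                     f"Multiple inconsistent occurences of '{k}' for '{path}'"
--                 )
--     return {
--         path: {k: merged[path][k] for k in sorted(merged[path])}
--         for path in sorted(merged)
--     }
-- ===== Notes on version B (the rewrite author's own statement) =====
-- stated objective: alternative
-- what changed: Replaces A's sort-whole-list-then-groupby (done once for the paths and once per port for the keys) with a single pass that hash-groups into nested dicts with a first-wins merge and on-the-fly consistency check, sorting only the distinct paths and distinct keys for the output.
import Mathlib
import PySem

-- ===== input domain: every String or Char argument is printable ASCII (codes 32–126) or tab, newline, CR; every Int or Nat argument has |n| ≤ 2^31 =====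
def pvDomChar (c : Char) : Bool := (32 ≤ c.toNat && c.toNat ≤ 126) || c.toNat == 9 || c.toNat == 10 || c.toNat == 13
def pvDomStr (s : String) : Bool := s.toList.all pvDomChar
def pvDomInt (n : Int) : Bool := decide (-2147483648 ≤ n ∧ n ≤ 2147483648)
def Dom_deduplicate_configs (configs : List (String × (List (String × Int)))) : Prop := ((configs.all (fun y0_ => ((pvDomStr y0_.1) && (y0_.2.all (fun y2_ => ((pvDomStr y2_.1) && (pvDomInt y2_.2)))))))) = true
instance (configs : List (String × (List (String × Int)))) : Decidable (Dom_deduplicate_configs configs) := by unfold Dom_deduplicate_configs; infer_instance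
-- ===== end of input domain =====

-- B replaces A's sort-then-groupby grouping (once for paths, once per port for keys) by a
-- single hash-grouping pass with a first-wins merge, sorting only the distinct paths/keys
-- at the end (objective: alternative).

-- ===== PORT A =====
-- itertools.groupby of a list of pairs, keyed by the first component: groups ADJACENT
-- runs of equal keys (takeWhile/dropWhile = the maximal run and the remainder).
def pyGroupby {α : Type} : List (String × α) → List (String × List α)
  | [] => []
  | (k, v) :: t =>
    (k, v :: (t.takeWhile (fun p => p.1 == k)).map (fun p => p.2)) ::
      pyGroupby (t.dropWhile (fun p => p.1 == k))
termination_by l => l.length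
decreasing_by
  have := List.length_dropWhile_le (fun p => p.1 == k) t
  simp; omega

-- groupitems: sort by first component, groupby, collect into a dict comprehension
def groupitems {α : Type} (items : List (String × α)) : PySem.Dict String (List α) :=
  PySem.Dict.ofList (pyGroupby (PySem.List.sorted items (fun p => p.1) false))

-- dedup(cfgs, path): concatenate all items, group by key, check compatibility, keep vals[0]
def dedupA (cfgs : List (List (String × Int))) : PySem.Dict String Int :=
  let items := cfgs.flatMap (fun cfg => cfg)
  let grouped := groupitems items
  grouped.items.foldl (fun port kv =>
    match kv.2 with
    | [] => port            -- unreachable: every groupby group is nonempty (vals[0])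
    | val :: rest =>
      if rest.any (fun v => !(v == val)) then port   -- Python: raise ValueError (excluded by Pre_)
      else port.insert kv.1 val) PySem.Dict.empty

def deduplicate_configs (configs : List (String × (List (String × Int)))) : List (String × List (String × Int)) :=
  (PySem.Dict.ofList ((groupitems configs).items.map (fun pc => (pc.1, (dedupA pc.2).items)))).items

-- ===== PORT B =====
-- inner loop of B: merge one cfg into the port dict, first value wins
-- (the 'elif port[k] != v: raise ValueError' branch leaves port unchanged; excluded by Pre_)
def bMergeCfg (port : PySem.Dict String Int) (cfg : List (String × Int)) : PySem.Dict String Int :=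
  cfg.foldl (fun port kv =>
    if !(port.contains kv.1) then port.insert kv.1 kv.2 else port) port

def deduplicate_configs_alt (configs : List (String × (List (String × Int)))) : List (String × List (String × Int)) :=
  -- merged = {}; for path, cfg in configs: port = merged.setdefault(path, {}); merge cfg
  -- (setdefault + in-place mutation of `port` ≡ read-modify-write of merged[path])
  let merged := configs.foldl
    (fun merged pc => merged.insert pc.1 (bMergeCfg (merged.getD pc.1 PySem.Dict.empty) pc.2))
    PySem.Dict.empty
  -- {path: {k: merged[path][k] for k in sorted(merged[path])} for path in sorted(merged)}:
  -- dict comprehensions over DISTINCT sorted keys, so items = the mapped list; the lookup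
  -- merged[path][k] has k ∈ keys, so the getD default is never used
  (PySem.List.sorted merged.keys (fun k => k) false).map (fun p =>
    let port := merged.getD p PySem.Dict.empty
    (p, (PySem.List.sorted port.keys (fun k => k) false).map (fun k => (k, port.getD k 0))))

-- ===== PRECONDITION & SPEC =====
-- Pre_ excludes exactly the inputs where A raises ValueError: two occurrences of the same
-- key under the same path carrying different values (B raises there as well).
def Pre_deduplicate_configs (configs : List (String × (List (String × Int)))) : Prop :=
  ∀ pc ∈ configs, ∀ kv ∈ pc.2, ∀ pc' ∈ configs, ∀ kv' ∈ pc'.2,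
    pc.1 = pc'.1 → kv.1 = kv'.1 → kv.2 = kv'.2
instance (configs : List (String × (List (String × Int)))) : Decidable (Pre_deduplicate_configs configs) := by unfold Pre_deduplicate_configs; infer_instance

def pvWitness_deduplicate_configs : (List (String × (List (String × Int)))) :=
  [("out0", [("lo", 1), ("att", 2)]), ("out0", [("lo", 1)]), ("in0", [("lo", 5)])]

def Spec_deduplicate_configs (configs : List (String × (List (String × Int)))) (out : List (String × List (String × Int))) : Prop := out = deduplicate_configs_alt configs
instance (configs : List (String × (List (String × Int)))) (out : List (String × List (String × Int))) : Decidable (Spec_deduplicate_configs configs out) := by unfold Spec_deduplicate_configs; infer_instance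

-- ===== CLAIM (what is proved, stated in full; the proofs are below) =====
def Claim_equal_deduplicate_configs : Prop := ∀ (configs : List (String × (List (String × Int)))), Dom_deduplicate_configs configs → Pre_deduplicate_configs configs → Spec_deduplicate_configs configs (deduplicate_configs configs)

-- ===== LEMMAS AND PROOFS =====

-- the common canonical value both programs compute: distinct paths in sorted order; per
-- path, the concatenated items of its configs in input order; distinct keys sorted; per
-- key its first value
def itemsOf (configs : List (String × (List (String × Int)))) (p : String) : List (String × Int) :=
  ((configs.filter (fun pc => pc.1 == p)).map (fun pc => pc.2)).flatten

def canonOut (configs : List (String × (List (String × Int)))) : List (String × List (String × Int)) :=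
  (PySem.List.sorted (PySem.Set.ofList (configs.map (fun pc => pc.1))) (fun k => k) false).map (fun p =>
    (p, (PySem.List.sorted (PySem.Set.ofList ((itemsOf configs p).map (fun kv => kv.1))) (fun k => k) false).map (fun k =>
      (k, (((itemsOf configs p).filter (fun kv => kv.1 == k)).map (fun kv => kv.2)).headD 0))))

-- ---- generic facts ----

theorem ofList_sublist_aux {α : Type} [BEq α] (xs acc pref : List α) (h : acc.Sublist pref) :
    (xs.foldl PySem.Set.add acc).Sublist (pref ++ xs) := by
  induction xs generalizing acc pref with
  | nil => simpa using h
  | cons x t ih =>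
    simp only [List.foldl_cons]
    have h2 : (PySem.Set.add acc x).Sublist (pref ++ [x]) := by
      unfold PySem.Set.add
      split
      · exact h.trans (List.sublist_append_left pref [x])
      · exact h.append (List.Sublist.refl [x])
    have h3 := ih (PySem.Set.add acc x) (pref ++ [x]) h2
    simpa [List.append_assoc] using h3

theorem ofList_sublist {α : Type} [BEq α] (xs : List α) : (PySem.Set.ofList xs).Sublist xs := by
  have := ofList_sublist_aux xs [] [] (List.Sublist.refl [])
  simpa [PySem.Set.ofList] using this

-- stability of Python's sort: the elements with a given key keep their relative order
theorem insertBy_nil {α : Type} (before : α → α → Bool) (x : α) :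
    PySem.List.insertBy before x [] = [x] := rfl

theorem insertBy_cons {α : Type} (before : α → α → Bool) (x y : α) (ys : List α) :
    PySem.List.insertBy before x (y :: ys)
      = if before x y then x :: y :: ys else y :: PySem.List.insertBy before x ys := rfl

theorem filter_insertBy_ne {α : Type} (key : α → String) (k : String) (x : α) (ys : List α)
    (hx : (key x == k) = false) :
    (PySem.List.insertBy (fun a b => decide (key a < key b)) x ys).filter (fun y => key y == k)
      = ys.filter (fun y => key y == k) := by
  induction ys with
  | nil => simp [insertBy_nil, hx]
  | cons y t ih =>
    rw [insertBy_cons]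
    split
    · simp [hx]
    · simp only [List.filter_cons]
      split
      · simpa using ih
      · simpa using ih

theorem filter_insertBy_eq {α : Type} (key : α → String) (k : String) (x : α) (ys : List α)
    (hx : (key x == k) = true) (hys : ys.Pairwise (fun a b => key a ≤ key b)) :
    (PySem.List.insertBy (fun a b => decide (key a < key b)) x ys).filter (fun y => key y == k)
      = ys.filter (fun y => key y == k) ++ [x] := by
  induction ys with
  | nil => simp [insertBy_nil, hx]
  | cons y t ih =>
    have hk : key x = k := by simpa using hx
    rw [insertBy_cons]
    split
    · next hlt =>
      have hlt' : key x < key y := by simpa using hlt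
      have hnil : (y :: t).filter (fun z => key z == k) = [] := by
        rw [List.filter_eq_nil_iff]
        intro z hz
        have hyz : key y ≤ key z := by
          rcases List.mem_cons.mp hz with rfl | hz'
          · exact le_refl _
          · exact (List.pairwise_cons.mp hys).1 z hz'
        have : k < key z := lt_of_lt_of_le (hk ▸ hlt') hyz
        simp [ne_of_gt this]
      simp [hnil, hx]
    · have ht := (List.pairwise_cons.mp hys).2
      simp only [List.filter_cons]
      split
      · rw [ih ht]; rfl
      · rw [ih ht]

theorem sorted_filter_key {α : Type} (l : List α) (key : α → String) (k : String) :
    (PySem.List.sorted l key false).filter (fun y => key y == k) = l.filter (fun y => key y == k) := by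
  induction l using List.reverseRecOn with
  | nil => simp [PySem.List.sorted]
  | append_singleton t a ih =>
    rw [PySem.List.sorted_eq_foldl_insertBy, List.foldl_append, ← PySem.List.sorted_eq_foldl_insertBy]
    simp only [List.foldl_cons, List.foldl_nil]
    by_cases hk : (key a == k) = true
    · rw [filter_insertBy_eq key k a _ hk (PySem.List.sorted_pairwise t key), ih, List.filter_append]
      simp [hk]
    · rw [filter_insertBy_ne key k a _ (by simpa using hk), ih, List.filter_append]
      simp [hk]

theorem sorted_distinct_keys {α : Type} (l : List α) (key : α → String) :
    PySem.Set.ofList ((PySem.List.sorted l key false).map key)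
      = PySem.List.sorted (PySem.Set.ofList (l.map key)) (fun k => k) false := by
  symm
  apply PySem.List.sorted_eq_of_perm_of_pairwise_lt
  · rw [List.perm_ext_iff_of_nodup (PySem.Set.nodup_ofList _) (PySem.Set.nodup_ofList _)]
    intro a
    simp only [PySem.Set.mem_ofList, List.mem_map]
    constructor
    · rintro ⟨x, hx, rfl⟩
      exact ⟨x, (PySem.List.mem_sorted _ _ _ _).mp hx, rfl⟩
    · rintro ⟨x, hx, rfl⟩
      exact ⟨x, (PySem.List.mem_sorted _ _ _ _).mpr hx, rfl⟩
  · have hle : (PySem.Set.ofList ((PySem.List.sorted l key false).map key)).Pairwise (fun a b => a ≤ b) :=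
      (PySem.List.sorted_map_key_pairwise l key).sublist (ofList_sublist _)
    have hnd : (PySem.Set.ofList ((PySem.List.sorted l key false).map key)).Nodup := PySem.Set.nodup_ofList _
    exact (hle.and hnd).imp (fun hab => lt_of_le_of_ne hab.1 hab.2)

theorem ofList_cons_group (k : String) (ts ds : List String)
    (h1 : ∀ y ∈ ts, y = k) (h2 : k ∉ ds) :
    PySem.Set.ofList (k :: (ts ++ ds)) = k :: PySem.Set.ofList ds := by
  have e0 : PySem.Set.ofList (k :: (ts ++ ds)) = PySem.Set.update [k] (ts ++ ds) := rfl
  rw [e0, PySem.Set.update_append]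
  have e1 : PySem.Set.update [k] ts = [k] := by
    rw [PySem.Set.update_eq_append_filter]
    have hnil : (PySem.Set.ofList ts).filter (fun y => !PySem.Set.contains [k] y) = [] := by
      rw [List.filter_eq_nil_iff]
      intro y hy
      have hyk : y = k := h1 y ((PySem.Set.mem_ofList _ _).mp hy)
      simp [PySem.Set.contains, hyk]
    rw [hnil, List.append_nil]
  rw [e1, PySem.Set.update_eq_append_filter]
  have e2 : (PySem.Set.ofList ds).filter (fun y => !PySem.Set.contains [k] y) = PySem.Set.ofList ds := by
    rw [List.filter_eq_self]
    intro y hy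
    have hyk : y ≠ k := by
      intro hcontra
      exact h2 (hcontra ▸ (PySem.Set.mem_ofList _ _).mp hy)
    simp [PySem.Set.contains, hyk]
  rw [e2]
  rfl

theorem pyGroupby_pairwise {α : Type} (s : List (String × α))
    (h : s.Pairwise (fun a b => a.1 ≤ b.1)) :
    pyGroupby s = (PySem.Set.ofList (s.map (fun p => p.1))).map
      (fun k => (k, (s.filter (fun p => p.1 == k)).map (fun p => p.2))) := by
  induction s using pyGroupby.induct with
  | case1 => simp [pyGroupby]
  | case2 k v t ih =>
    have hp := List.pairwise_cons.mp h
    have hhead : ∀ p ∈ t, k ≤ p.1 := fun p hp' => hp.1 p hp'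
    have htail : t.Pairwise (fun a b => a.1 ≤ b.1) := hp.2
    have hTD : t.takeWhile (fun p => p.1 == k) ++ t.dropWhile (fun p => p.1 == k) = t :=
      List.takeWhile_append_dropWhile
    have hTk : ∀ p ∈ t.takeWhile (fun p => p.1 == k), p.1 = k := by
      intro p hp'
      simpa using List.mem_takeWhile_imp hp'
    have hDk : ∀ p ∈ t.dropWhile (fun p => p.1 == k), p.1 ≠ k := by
      intro p hpD
      cases hDnil : t.dropWhile (fun p => p.1 == k) with
      | nil => rw [hDnil] at hpD; simp at hpD
      | cons d D' =>
        have hd : (d.1 == k) = false := by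
          have hh := List.head?_dropWhile_not (fun p => p.1 == k) t
          rw [hDnil] at hh
          simpa using hh
        have hdne : d.1 ≠ k := by simpa using hd
        have hdt : d ∈ t := (List.dropWhile_sublist _).mem (by rw [hDnil]; exact List.mem_cons_self ..)
        have hkd : k < d.1 := lt_of_le_of_ne (hhead d hdt) (Ne.symm hdne)
        have hDpair' : (d :: D').Pairwise (fun a b => a.1 ≤ b.1) := by
          rw [← hDnil]; exact htail.sublist (List.dropWhile_sublist _)
        rw [hDnil] at hpD
        rcases List.mem_cons.mp hpD with rfl | hpD'
        · exact hdne
        · have hle : d.1 ≤ p.1 := (List.pairwise_cons.mp hDpair').1 p hpD'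
          intro hc
          have hlt : k < p.1 := lt_of_lt_of_le hkd hle
          rw [hc] at hlt
          exact lt_irrefl k hlt
    have hDpair : (t.dropWhile (fun p => p.1 == k)).Pairwise (fun a b => a.1 ≤ b.1) :=
      htail.sublist (List.dropWhile_sublist _)
    have hkeys : PySem.Set.ofList (((k, v) :: t).map (fun p => p.1))
        = k :: PySem.Set.ofList ((t.dropWhile (fun p => p.1 == k)).map (fun p => p.1)) := by
      have hsplit : ((k, v) :: t).map (fun p => p.1)
          = k :: ((t.takeWhile (fun p => p.1 == k)).map (fun p => p.1)
              ++ (t.dropWhile (fun p => p.1 == k)).map (fun p => p.1)) := by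
        rw [← List.map_append, hTD]
        rfl
      rw [hsplit]
      apply ofList_cons_group
      · intro y hy
        rcases List.mem_map.mp hy with ⟨p, hpT, rfl⟩
        exact hTk p hpT
      · intro hk
        rcases List.mem_map.mp hk with ⟨p, hpD, hpk⟩
        exact hDk p hpD hpk
    have hfiltT : (t.takeWhile (fun p => p.1 == k)).filter (fun p => p.1 == k)
        = t.takeWhile (fun p => p.1 == k) := by
      rw [List.filter_eq_self]
      intro p hp'
      simpa using hTk p hp'
    have hfiltD : ∀ k', k' ≠ k → ((k, v) :: t).filter (fun p => p.1 == k')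
        = (t.dropWhile (fun p => p.1 == k)).filter (fun p => p.1 == k') := by
      intro k' hk'
      rw [List.filter_cons, ← hTD, List.filter_append]
      have h1 : ((k, v).1 == k') = false := by simpa using (Ne.symm hk')
      have h2 : (t.takeWhile (fun p => p.1 == k)).filter (fun p => p.1 == k') = [] := by
        rw [List.filter_eq_nil_iff]
        intro p hp'
        simp [hTk p hp', Ne.symm hk']
      simp [h1, h2]
    conv_lhs => rw [pyGroupby]
    rw [hkeys, List.map_cons]
    congr 1
    · have hfilter : ((k, v) :: t).filter (fun p => p.1 == k)
          = (k, v) :: t.takeWhile (fun p => p.1 == k) := by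
        rw [List.filter_cons, ← hTD, List.filter_append]
        have hD0 : (t.dropWhile (fun p => p.1 == k)).filter (fun p => p.1 == k) = [] := by
          rw [List.filter_eq_nil_iff]
          intro p hp'
          simpa using hDk p hp'
        -- the head passes the filter, the run passes wholesale, the remainder contributes nothing
        simp [hfiltT, hD0]
      rw [hfilter]
      simp
    · rw [ih hDpair]
      apply List.map_congr_left
      intro k' hk'
      have hk'ne : k' ≠ k := by
        rcases List.mem_map.mp ((PySem.Set.mem_ofList _ _).mp hk') with ⟨p, hpD, rfl⟩
        exact hDk p hpD
      rw [hfiltD k' hk'ne]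

theorem items_ofList_of_nodup {β : Type} (pairs : List (String × β))
    (h : (pairs.map (fun p => p.1)).Nodup) : (PySem.Dict.ofList pairs).items = pairs := by
  have e : PySem.Dict.ofList pairs = pairs.foldl (fun d a => d.insert a.1 a.2) PySem.Dict.empty := rfl
  rw [e, PySem.Dict.items_foldl_insert_fresh pairs (fun a => a.1) (fun a => a.2) PySem.Dict.empty
      (fun a _ => PySem.Dict.contains_empty _) h]
  show ([] : List (String × β)) ++ _ = pairs
  simp

theorem groupitems_items {α : Type} (l : List (String × α)) :
    (groupitems l).items
      = (PySem.List.sorted (PySem.Set.ofList (l.map (fun p => p.1))) (fun k => k) false).map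
          (fun k => (k, (l.filter (fun p => p.1 == k)).map (fun p => p.2))) := by
  unfold groupitems
  rw [pyGroupby_pairwise _ (PySem.List.sorted_pairwise l (fun p => p.1)), items_ofList_of_nodup]
  · rw [sorted_distinct_keys l (fun p => p.1)]
    apply List.map_congr_left
    intro k _
    rw [sorted_filter_key l (fun p => p.1) k]
  · rw [List.map_map,
      show ((fun (p : String × List α) => p.1) ∘ fun k =>
          (k, List.map (fun p => p.2) (List.filter (fun p => p.1 == k)
            (PySem.List.sorted l (fun p => p.1) false)))) = id from rfl,
      List.map_id]
    exact PySem.Set.nodup_ofList _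

-- ---- A side ----

theorem dedupA_items (cfgs : List (List (String × Int)))
    (hcons : ∀ kv ∈ cfgs.flatten, ∀ kv' ∈ cfgs.flatten, kv.1 = kv'.1 → kv.2 = kv'.2) :
    (dedupA cfgs).items
      = (PySem.List.sorted (PySem.Set.ofList (cfgs.flatten.map (fun kv => kv.1))) (fun k => k) false).map
          (fun k => (k, ((cfgs.flatten.filter (fun kv => kv.1 == k)).map (fun kv => kv.2)).headD 0)) := by
  have e : dedupA cfgs = (groupitems (cfgs.flatMap fun cfg => cfg)).items.foldl
      (fun port kv =>
        match kv.2 with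
        | [] => port
        | val :: rest =>
          if rest.any (fun v => !(v == val)) then port
          else port.insert kv.1 val) PySem.Dict.empty := rfl
  have eflat : (cfgs.flatMap fun cfg => cfg) = cfgs.flatten := List.flatMap_id
  rw [e, eflat, groupitems_items cfgs.flatten]
  -- every group is nonempty and all its values coincide, so the loop body is a plain insert
  have hall : ∀ k : String, ∀ v1 ∈ (cfgs.flatten.filter (fun q => q.1 == k)).map (fun q => q.2),
      ∀ v2 ∈ (cfgs.flatten.filter (fun q => q.1 == k)).map (fun q => q.2), v1 = v2 := by
    intro k v1 h1 v2 h2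
    rcases List.mem_map.mp h1 with ⟨q1, hq1, rfl⟩
    rcases List.mem_map.mp h2 with ⟨q2, hq2, rfl⟩
    rcases List.mem_filter.mp hq1 with ⟨hq1m, hq1k⟩
    rcases List.mem_filter.mp hq2 with ⟨hq2m, hq2k⟩
    exact hcons q1 hq1m q2 hq2m (by rw [eq_of_beq hq1k, eq_of_beq hq2k])
  rw [PySem.List.foldl_congr_mem _ _ (fun port kv => port.insert kv.1 (kv.2.headD 0)) _ ?hcg]
  case hcg =>
    intro acc kv hkv
    rcases List.mem_map.mp hkv with ⟨k, hkmem, rfl⟩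
    have hkm : k ∈ cfgs.flatten.map (fun kv => kv.1) := by
      have := (PySem.List.mem_sorted _ _ _ _).mp hkmem
      exact (PySem.Set.mem_ofList _ _).mp this
    rcases List.mem_map.mp hkm with ⟨q, hqm, rfl⟩
    have hqf : q ∈ cfgs.flatten.filter (fun r => r.1 == q.1) := List.mem_filter.mpr ⟨hqm, by simp⟩
    cases hvals : (cfgs.flatten.filter (fun r => r.1 == q.1)).map (fun r => r.2) with
    | nil =>
      exact absurd (List.mem_map_of_mem hqf) (by rw [hvals]; exact List.not_mem_nil)
    | cons val rest =>
      have hany : rest.any (fun v => !(v == val)) = false := by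
        rw [List.any_eq_false]
        intro v hv
        have hvmem : v ∈ (cfgs.flatten.filter (fun r => r.1 == q.1)).map (fun r => r.2) := by
          rw [hvals]; exact List.mem_cons_of_mem _ hv
        have hvalmem : val ∈ (cfgs.flatten.filter (fun r => r.1 == q.1)).map (fun r => r.2) := by
          rw [hvals]; exact List.mem_cons_self ..
        simp [hall q.1 v hvmem val hvalmem]
      simp only [hany]
      simp
  have hnd : (((PySem.List.sorted (PySem.Set.ofList (cfgs.flatten.map (fun p => p.1))) (fun k => k) false).map
      (fun k => (k, (cfgs.flatten.filter (fun p => p.1 == k)).map (fun p => p.2)))).map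
        (fun (kv : String × List Int) => kv.1)).Nodup := by
    rw [List.map_map]
    show (List.map id (PySem.List.sorted (PySem.Set.ofList (cfgs.flatten.map (fun p => p.1))) (fun k => k) false)).Nodup
    rw [List.map_id]
    exact ((PySem.List.sorted_perm _ _ _).symm).nodup (PySem.Set.nodup_ofList _)
  have hins := PySem.Dict.items_foldl_insert_fresh
    (l := (PySem.List.sorted (PySem.Set.ofList (cfgs.flatten.map (fun p => p.1))) (fun k => k) false).map
      (fun k => (k, (cfgs.flatten.filter (fun p => p.1 == k)).map (fun p => p.2))))
    (k := fun (kv : String × List Int) => kv.1) (v := fun kv => kv.2.headD 0)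
    (d := PySem.Dict.empty) (fun a _ => PySem.Dict.contains_empty _) hnd
  rw [hins]
  show ([] : List (String × Int)) ++ _ = _
  rw [List.nil_append, List.map_map]
  rfl

theorem A_eq_canon (configs : List (String × (List (String × Int))))
    (hpre : Pre_deduplicate_configs configs) : deduplicate_configs configs = canonOut configs := by
  unfold deduplicate_configs
  rw [groupitems_items configs, items_ofList_of_nodup]
  · rw [List.map_map]
    unfold canonOut
    apply List.map_congr_left
    intro p hpmem
    simp only [Function.comp_apply]
    have hc : ∀ kv ∈ ((configs.filter (fun pc => pc.1 == p)).map (fun pc => pc.2)).flatten,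
        ∀ kv' ∈ ((configs.filter (fun pc => pc.1 == p)).map (fun pc => pc.2)).flatten,
        kv.1 = kv'.1 → kv.2 = kv'.2 := by
      intro kv h1 kv' h2 hk
      rcases List.mem_flatten.mp h1 with ⟨cfg, hcfg, hkv⟩
      rcases List.mem_map.mp hcfg with ⟨pc, hpc, rfl⟩
      rcases List.mem_filter.mp hpc with ⟨hpcm, hpck⟩
      rcases List.mem_flatten.mp h2 with ⟨cfg', hcfg', hkv'⟩
      rcases List.mem_map.mp hcfg' with ⟨pc', hpc', rfl⟩
      rcases List.mem_filter.mp hpc' with ⟨hpcm', hpck'⟩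
      exact hpre pc hpcm kv hkv pc' hpcm' kv' hkv'
        (by rw [eq_of_beq hpck, eq_of_beq hpck']) hk
    have hlem := dedupA_items ((configs.filter (fun pc => pc.1 == p)).map (fun pc => pc.2)) hc
    rw [hlem]
    unfold itemsOf
    rfl
  · rw [List.map_map, List.map_map]
    show (List.map id (PySem.List.sorted (PySem.Set.ofList (configs.map (fun pc => pc.1))) (fun k => k) false)).Nodup
    rw [List.map_id]
    exact ((PySem.List.sorted_perm _ _ _).symm).nodup (PySem.Set.nodup_ofList _)

-- ---- B side ----

-- the first-wins dict built from a flat item list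
def firstDict (l : List (String × Int)) : PySem.Dict String Int :=
  l.foldl (fun port kv => if !(port.contains kv.1) then port.insert kv.1 kv.2 else port) PySem.Dict.empty

theorem bMergeCfg_flatten (cfgsList : List (List (String × Int))) :
    cfgsList.foldl bMergeCfg PySem.Dict.empty = firstDict cfgsList.flatten := by
  unfold firstDict
  rw [List.foldl_flatten]
  rfl

theorem merged_getD (configs : List (String × (List (String × Int))))
    (d : PySem.Dict String (PySem.Dict String Int)) (p : String) :
    (configs.foldl (fun merged pc =>
        merged.insert pc.1 (bMergeCfg (merged.getD pc.1 PySem.Dict.empty) pc.2)) d).getD p PySem.Dict.empty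
      = ((configs.filter (fun pc => pc.1 == p)).map (fun pc => pc.2)).foldl bMergeCfg
          (d.getD p PySem.Dict.empty) := by
  induction configs generalizing d with
  | nil => simp
  | cons pc t ih =>
    simp only [List.foldl_cons, List.filter_cons]
    by_cases hp : pc.1 = p
    · have hb : (pc.1 == p) = true := by simp [hp]
      rw [if_pos hb, ih]
      simp only [List.map_cons, List.foldl_cons]
      have hinit : (d.insert pc.1 (bMergeCfg (d.getD pc.1 PySem.Dict.empty) pc.2)).getD p PySem.Dict.empty
          = bMergeCfg (d.getD p PySem.Dict.empty) pc.2 := by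
        rw [PySem.Dict.getD_insert, if_pos hp.symm, hp]
      rw [hinit]
    · have hb : (pc.1 == p) = false := by simp [hp]
      rw [if_neg (by simp [hb]), ih]
      have hinit : (d.insert pc.1 (bMergeCfg (d.getD pc.1 PySem.Dict.empty) pc.2)).getD p PySem.Dict.empty
          = d.getD p PySem.Dict.empty := by
        rw [PySem.Dict.getD_insert, if_neg (fun h => hp h.symm)]
      rw [hinit]

theorem headD_append_left {α : Type} (xs ys : List α) (d : α) (h : xs ≠ []) :
    (xs ++ ys).headD d = xs.headD d := by
  cases xs with
  | nil => exact absurd rfl h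
  | cons x t => rfl

theorem firstDict_append (t : List (String × Int)) (kv : String × Int) :
    firstDict (t ++ [kv])
      = if !((firstDict t).contains kv.1) then (firstDict t).insert kv.1 kv.2 else firstDict t := by
  unfold firstDict
  rw [List.foldl_append]
  rfl

theorem firstDict_keys (l : List (String × Int)) :
    (firstDict l).keys = PySem.Set.ofList (l.map (fun kv => kv.1)) := by
  induction l using List.reverseRecOn with
  | nil => rfl
  | append_singleton t kv ih =>
    rw [firstDict_append]
    have hof : PySem.Set.ofList ((t ++ [kv]).map (fun kv => kv.1))
        = PySem.Set.add (PySem.Set.ofList (t.map (fun kv => kv.1))) kv.1 := by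
      rw [List.map_append, PySem.Set.ofList_append]
      rfl
    by_cases hc : (firstDict t).contains kv.1 = true
    · have hmem : kv.1 ∈ PySem.Set.ofList (t.map (fun kv => kv.1)) := by
        rw [← ih]
        exact (PySem.Dict.contains_iff_mem_keys _ _).mp hc
      have hadd : PySem.Set.add (PySem.Set.ofList (t.map (fun kv => kv.1))) kv.1
          = PySem.Set.ofList (t.map (fun kv => kv.1)) := by
        unfold PySem.Set.add
        rw [if_pos]
        simp [PySem.Set.contains, hmem]
      rw [hof, hadd, ← ih, if_neg (by simp [hc])]
    · have hcf : (firstDict t).contains kv.1 = false := by simpa using hc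
      have hmem : kv.1 ∉ PySem.Set.ofList (t.map (fun kv => kv.1)) := by
        rw [← ih]
        intro hmm
        have := (PySem.Dict.contains_iff_mem_keys _ _).mpr hmm
        rw [this] at hcf
        exact absurd hcf (by decide)
      have hadd : PySem.Set.add (PySem.Set.ofList (t.map (fun kv => kv.1))) kv.1
          = PySem.Set.ofList (t.map (fun kv => kv.1)) ++ [kv.1] := by
        unfold PySem.Set.add
        rw [if_neg]
        simp [PySem.Set.contains, hmem]
      rw [hof, hadd, ← ih, if_pos (by simp [hcf])]
      exact PySem.Dict.keys_insert_of_not_contains _ _ hcf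

theorem firstDict_getD (l : List (String × Int)) (k : String) :
    (firstDict l).getD k 0 = ((l.filter (fun kv => kv.1 == k)).map (fun kv => kv.2)).headD 0 := by
  induction l using List.reverseRecOn with
  | nil => rfl
  | append_singleton t kv ih =>
    rw [firstDict_append, List.filter_append, List.map_append]
    by_cases hc : (firstDict t).contains kv.1 = true
    · -- key already present: the dict and the first value are unchanged
      rw [if_neg (by simp [hc])]
      by_cases hk : kv.1 = k
      · have hne : (t.filter (fun kv => kv.1 == k)).map (fun kv => kv.2) ≠ [] := by
          have hmem : kv.1 ∈ (firstDict t).keys := (PySem.Dict.contains_iff_mem_keys _ _).mp hc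
          rw [firstDict_keys] at hmem
          have hmm : kv.1 ∈ t.map (fun kv => kv.1) := (PySem.Set.mem_ofList _ _).mp hmem
          rcases List.mem_map.mp hmm with ⟨q, hq, hqk⟩
          have hqf : q ∈ t.filter (fun kv => kv.1 == k) :=
            List.mem_filter.mpr ⟨hq, by simp [hqk, hk]⟩
          intro hnil
          exact absurd (List.mem_map_of_mem hqf) (by rw [hnil]; exact List.not_mem_nil)
        rw [headD_append_left _ _ _ hne]
        exact ih
      · have hskip : ([kv].filter (fun kv => kv.1 == k)).map (fun kv => kv.2) = [] := by
          simp [hk]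
        rw [hskip, List.append_nil]
        exact ih
    · have hcf : (firstDict t).contains kv.1 = false := by simpa using hc
      rw [if_pos (by simp [hcf]), PySem.Dict.getD_insert]
      by_cases hk : k = kv.1
      · have hnil : (t.filter (fun kv => kv.1 == k)).map (fun kv => kv.2) = [] := by
          have hmem : kv.1 ∉ (firstDict t).keys := by
            intro hmm
            have := (PySem.Dict.contains_iff_mem_keys _ _).mpr hmm
            rw [this] at hcf
            exact absurd hcf (by decide)
          rw [firstDict_keys] at hmem
          have hnm : kv.1 ∉ t.map (fun kv => kv.1) := fun hmm =>
            hmem ((PySem.Set.mem_ofList _ _).mpr hmm)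
          rw [List.filter_eq_nil_iff.mpr, List.map_nil]
          intro q hq hqk
          exact hnm (hk ▸ (eq_of_beq hqk) ▸ List.mem_map_of_mem hq)
        rw [hnil, List.nil_append, if_pos hk]
        simp [hk]
      · rw [if_neg hk]
        have hskip : ([kv].filter (fun kv => kv.1 == k)).map (fun kv => kv.2) = [] := by
          simp
          exact fun h => hk (Eq.symm h)
        rw [hskip, List.append_nil]
        exact ih

theorem B_eq_canon (configs : List (String × (List (String × Int)))) :
    deduplicate_configs_alt configs = canonOut configs := by
  have e : deduplicate_configs_alt configs
      = (PySem.List.sorted (configs.foldl (fun merged pc =>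
            merged.insert pc.1 (bMergeCfg (merged.getD pc.1 PySem.Dict.empty) pc.2))
            PySem.Dict.empty).keys (fun k => k) false).map (fun p =>
          (p, (PySem.List.sorted ((configs.foldl (fun merged pc =>
              merged.insert pc.1 (bMergeCfg (merged.getD pc.1 PySem.Dict.empty) pc.2))
              PySem.Dict.empty).getD p PySem.Dict.empty).keys (fun k => k) false).map (fun k =>
            (k, ((configs.foldl (fun merged pc =>
              merged.insert pc.1 (bMergeCfg (merged.getD pc.1 PySem.Dict.empty) pc.2))
              PySem.Dict.empty).getD p PySem.Dict.empty).getD k 0)))) := rfl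
  rw [e]
  have hkeys : (configs.foldl (fun merged pc =>
      merged.insert pc.1 (bMergeCfg (merged.getD pc.1 PySem.Dict.empty) pc.2))
      PySem.Dict.empty).keys = PySem.Set.ofList (configs.map (fun pc => pc.1)) := by
    rw [PySem.Dict.keys_foldl_insert_key configs (fun pc => pc.1)
      (fun d pc => bMergeCfg (d.getD pc.1 PySem.Dict.empty) pc.2) PySem.Dict.empty]
    rw [PySem.Dict.keys_empty, PySem.Set.update_nil_left]
  have hport : ∀ p : String, (configs.foldl (fun merged pc =>
      merged.insert pc.1 (bMergeCfg (merged.getD pc.1 PySem.Dict.empty) pc.2))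
      PySem.Dict.empty).getD p PySem.Dict.empty = firstDict (itemsOf configs p) := by
    intro p
    rw [merged_getD configs PySem.Dict.empty p, PySem.Dict.getD_empty, bMergeCfg_flatten]
    rfl
  rw [hkeys]
  unfold canonOut
  apply List.map_congr_left
  intro p _
  rw [hport p, firstDict_keys]
  show (p, _) = (p, _)
  congr 1
  apply List.map_congr_left
  intro k _
  rw [firstDict_getD]

-- ===== VERDICT (by name: the statement is the Claim_ definition above) =====
theorem deduplicate_configs_spec : Claim_equal_deduplicate_configs := by
  intro configs _ hpre
  unfold Spec_deduplicate_configs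
  rw [A_eq_canon configs hpre, B_eq_canon configs]
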